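-- pv_equiv track=rewrite | github.com/Akhil-Kana/CISC-131-Python-and-C-work | CISC 131 py/133tSpeak.py | to133t
-- ===== SOURCE A (Python) =====
-- def to133t(string):
--     text = ""
--     for i in range(len(string)):
--         if string[i] == "e" or string[i] == "E":
--             text += "3"
--         elif string[i] == "s" or string[i] == "S":
--             text += "5"
--         elif string[i] == "o" or string[i] == "O":
--             text += "0"
--         else:
--             text += string[i]
--     return text
-- ===== SOURCE B (Python) =====
-- def to133t(string):
--     for old, new in (("e", "3"), ("E", "3"), ("s", "5"), ("S", "5"), ("o", "0"), ("O", "0")):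
--         string = string.replace(old, new)
--     return string
-- ===== Notes on version B (the rewrite author's own statement) =====
-- stated objective: alternative
-- what changed: Replaces A's single index loop with per-character if/elif branching and string concatenation by six staged whole-string str.replace passes, one per mapping; correct because the replacement digits 3/5/0 are never themselves replaced by a later pass.
import Mathlib
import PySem

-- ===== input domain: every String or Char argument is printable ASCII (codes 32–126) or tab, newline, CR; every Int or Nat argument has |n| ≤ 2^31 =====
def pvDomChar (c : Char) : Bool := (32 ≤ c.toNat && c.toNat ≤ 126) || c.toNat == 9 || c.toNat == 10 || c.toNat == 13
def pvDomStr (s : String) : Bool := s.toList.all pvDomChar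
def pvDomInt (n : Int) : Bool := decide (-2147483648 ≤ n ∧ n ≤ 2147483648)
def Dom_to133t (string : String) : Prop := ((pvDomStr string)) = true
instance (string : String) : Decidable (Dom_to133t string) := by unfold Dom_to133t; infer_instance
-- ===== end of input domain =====

-- B replaces A's one index loop with if/elif branching by six staged whole-string str.replace passes, one per mapping.

-- ===== PORT A =====
-- index loop: text starts empty; for i in range(len(string)) append the mapped character
def to133t (string : String) : String :=
  String.ofList ((PySem.List.pyRange 0 (PySem.Str.len string) 1).foldl
    (fun text i =>
      let c := PySem.List.pyGetD string.toList i ' '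
      if c = 'e' ∨ c = 'E' then text ++ ['3']
      else if c = 's' ∨ c = 'S' then text ++ ['5']
      else if c = 'o' ∨ c = 'O' then text ++ ['0']
      else text ++ [c]) [])

-- ===== PORT B =====
-- six staged str.replace passes, folded over the (old, new) pairs exactly as Source B's loop does
def to133t_alt (string : String) : String :=
  [("e", "3"), ("E", "3"), ("s", "5"), ("S", "5"), ("o", "0"), ("O", "0")].foldl
    (fun s (p : String × String) => PySem.Str.replace s p.1 p.2) string

-- ===== PRECONDITION & SPEC =====
def Spec_to133t (string : String) (out : String) : Prop := out = to133t_alt string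
instance (string : String) (out : String) : Decidable (Spec_to133t string out) := by unfold Spec_to133t; infer_instance

-- ===== CLAIM (what is proved, stated in full; the proofs are below) =====
def Claim_equal_to133t : Prop := ∀ (string : String), Dom_to133t string → Spec_to133t string (to133t string)

-- ===== LEMMAS AND PROOFS =====

-- replace.go with a single-character pattern is map of a pointwise substitution
lemma replace_go_single (o n : Char) (fuel : Nat) :
    ∀ (l acc : List Char), l.length ≤ fuel →
      PySem.Chars.replace.go [o] [n] fuel l acc =
        acc.reverse ++ l.map (fun c => if c = o then n else c) := by
  induction fuel with
  | zero =>
    intro l acc h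
    have : l = [] := List.length_eq_zero_iff.mp (Nat.le_zero.mp h)
    subst this
    simp [PySem.Chars.replace.go]
  | succ fuel ih =>
    intro l acc h
    cases l with
    | nil => simp [PySem.Chars.replace.go]
    | cons c t =>
      simp only [PySem.Chars.replace.go]
      by_cases hc : c = o
      · subst hc
        have hp : List.isPrefixOf [c] (c :: t) = true := by simp [List.isPrefixOf]
        rw [if_pos hp]
        simp only [List.length_cons] at h
        rw [ih (List.drop [c].length (c :: t)) _ (by simpa using Nat.le_of_succ_le_succ h)]
        simp
      · have hp : List.isPrefixOf [o] (c :: t) = false := by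
          simp [List.isPrefixOf, Ne.symm hc]
        rw [if_neg (by simp [hp])]
        simp only [List.length_cons] at h
        rw [ih t _ (Nat.le_of_succ_le_succ h)]
        simp [hc]

-- a single-character str.replace is a map over the characters
lemma replace_single (s : List Char) (o n : Char) :
    PySem.Chars.replace s [o] [n] = s.map (fun c => if c = o then n else c) := by
  simp only [PySem.Chars.replace, List.isEmpty_cons, if_false, Bool.false_eq_true]
  simpa using replace_go_single o n s.length s [] (le_refl _)

-- A's append-accumulator fold over a char list is map
lemma foldl_append_map (g : Char → Char) (xs : List Char) (acc : List Char) :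
    xs.foldl (fun text c => text ++ [g c]) acc = acc ++ xs.map g := by
  induction xs generalizing acc with
  | nil => simp
  | cons x xs ih => simp [List.foldl, ih]

-- ===== VERDICT (by name: the statement is the Claim_ definition above) =====
theorem to133t_spec : Claim_equal_to133t := by
  intro s _
  unfold Spec_to133t to133t to133t_alt
  have h := PySem.List.foldl_pyRange_zero_pyGetD' s.toList ' '
    (fun text c =>
      if c = 'e' ∨ c = 'E' then text ++ ['3']
      else if c = 's' ∨ c = 'S' then text ++ ['5']
      else if c = 'o' ∨ c = 'O' then text ++ ['0']
      else text ++ [c]) []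
  simp only [PySem.Str.len] at *
  rw [h]
  have hcong : s.toList.foldl
      (fun text c =>
        if c = 'e' ∨ c = 'E' then text ++ ['3']
        else if c = 's' ∨ c = 'S' then text ++ ['5']
        else if c = 'o' ∨ c = 'O' then text ++ ['0']
        else text ++ [c]) [] =
      s.toList.foldl (fun text c => text ++
        [if c = 'e' ∨ c = 'E' then '3'
         else if c = 's' ∨ c = 'S' then '5'
         else if c = 'o' ∨ c = 'O' then '0'
         else c]) [] := by
    apply PySem.List.foldl_congr_mem
    intro a x _
    split_ifs <;> rfl
  rw [hcong, foldl_append_map]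
  · simp only [List.foldl_cons, List.foldl_nil, PySem.Str.replace]
    simp only [String.toList_ofList]
    norm_num [show ("e" : String).toList = ['e'] from rfl,
      show ("E" : String).toList = ['E'] from rfl,
      show ("s" : String).toList = ['s'] from rfl,
      show ("S" : String).toList = ['S'] from rfl,
      show ("o" : String).toList = ['o'] from rfl,
      show ("O" : String).toList = ['O'] from rfl,
      show ("3" : String).toList = ['3'] from rfl,
      show ("5" : String).toList = ['5'] from rfl,
      show ("0" : String).toList = ['0'] from rfl,
      replace_single, List.map_map]
    apply congrArg
    apply List.map_congr_left
    intro c _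
    by_cases h1 : c = 'e'; · subst h1; decide
    by_cases h2 : c = 'E'; · subst h2; decide
    by_cases h3 : c = 's'; · subst h3; decide
    by_cases h4 : c = 'S'; · subst h4; decide
    by_cases h5 : c = 'o'; · subst h5; decide
    by_cases h6 : c = 'O'; · subst h6; decide
    simp [Function.comp, h1, h2, h3, h4, h5, h6]
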